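-- pv_equiv track=rewrite | github.com/mathiasness/tdt4215-news-recommender | src/recommenders/collaborative_filtering.py | _parse_clicked_from_impressions
-- ===== SOURCE A (Python) =====
-- def _parse_clicked_from_impressions(impressions: str) -> list[str]:
--     clicked = []
--     if not isinstance(impressions, str) or not impressions.strip():
--         return clicked
--
--     for imp in impressions.split():
--         if "-" not in imp:
--             continue
--         nid, label = imp.rsplit("-", 1)
--         if label == "1":
--             clicked.append(nid)
--     return clicked
-- ===== SOURCE B (Python) =====
-- def _parse_clicked_from_impressions(impressions: str) -> list[str]:
--     if not isinstance(impressions, str):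
--         return []
--     clicked = []
--     tok = ""
--     for ch in impressions:
--         if ch.isspace():
--             if tok.endswith("-1"):
--                 clicked.append(tok[:-2])
--             tok = ""
--         else:
--             tok += ch
--     if tok.endswith("-1"):
--         clicked.append(tok[:-2])
--     return clicked
-- ===== Notes on version B (the rewrite author's own statement) =====
-- stated objective: alternative
-- what changed: Replaces A's split()-then-rsplit-per-token pipeline by a single hand-written character-level state machine that scans the raw string once, accumulating the current token and flushing at each whitespace boundary (a token's last-dash label is '1' exactly when it ends with '-1').
import Mathlib
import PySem

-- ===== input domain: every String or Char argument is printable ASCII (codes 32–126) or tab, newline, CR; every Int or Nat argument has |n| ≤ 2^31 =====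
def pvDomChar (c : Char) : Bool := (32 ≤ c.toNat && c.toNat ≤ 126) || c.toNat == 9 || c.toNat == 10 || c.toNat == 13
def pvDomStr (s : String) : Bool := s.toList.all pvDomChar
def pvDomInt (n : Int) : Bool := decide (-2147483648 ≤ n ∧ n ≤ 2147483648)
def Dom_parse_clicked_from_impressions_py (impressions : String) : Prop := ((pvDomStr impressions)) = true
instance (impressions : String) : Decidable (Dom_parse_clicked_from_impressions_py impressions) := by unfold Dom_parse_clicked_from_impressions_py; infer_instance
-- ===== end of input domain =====

-- B replaces A's split()-then-rsplit-per-token pipeline by a single hand-written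
-- character-level state machine over the raw string (alternative decomposition).

-- ===== PORT A =====
def parse_clicked_from_impressions_py (impressions : String) : List String :=
  let clicked : List String := []
  -- isinstance(impressions, str) is always true under the type convention
  if PySem.Str.strip impressions == "" then clicked
  else
    (PySem.Str.split₀ impressions).foldl
      (fun clicked imp =>
        if PySem.Str.isIn "-" imp then
          -- imp.rsplit("-", 1): ported by hand via reverse/takeWhile; exact because "-" ∈ imp here
          let rev := imp.toList.reverse
          let label := (rev.takeWhile (fun c => c ≠ '-')).reverse
          let nid := String.ofList ((rev.dropWhile (fun c => c ≠ '-')).tail.reverse)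
          if label = ['1'] then clicked ++ [nid] else clicked
        else clicked)
      clicked

-- ===== PORT B =====
-- Source B's for-loop over the characters of `impressions` with state (tok, clicked),
-- plus the final flush after the loop (the `[]` case).
def pvScanB : List Char → List Char → List String → List String
  | [], tok, clicked =>
      if PySem.Chars.endswith tok ['-', '1'] then
        clicked ++ [String.ofList (PySem.Chars.slice tok none (some (-2)))]
      else clicked
  | c :: rest, tok, clicked =>
      if PySem.Chars.isspace c then
        pvScanB rest []
          (if PySem.Chars.endswith tok ['-', '1'] then
            clicked ++ [String.ofList (PySem.Chars.slice tok none (some (-2)))]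
          else clicked)
      else pvScanB rest (tok ++ [c]) clicked

def parse_clicked_from_impressions_py_alt (impressions : String) : List String :=
  pvScanB impressions.toList [] []

-- ===== PRECONDITION & SPEC =====
def Spec_parse_clicked_from_impressions_py (impressions : String) (out : List String) : Prop := out = parse_clicked_from_impressions_py_alt impressions
instance (impressions : String) (out : List String) : Decidable (Spec_parse_clicked_from_impressions_py impressions out) := by unfold Spec_parse_clicked_from_impressions_py; infer_instance

-- ===== CLAIM (what is proved, stated in full; the proofs are below) =====
def Claim_equal_parse_clicked_from_impressions_py : Prop := ∀ (impressions : String), Dom_parse_clicked_from_impressions_py impressions → Spec_parse_clicked_from_impressions_py impressions (parse_clicked_from_impressions_py impressions)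

-- ===== LEMMAS AND PROOFS =====

-- Middle form both ports are reduced to: keep the tokens ending in "-1", drop that suffix.
def pvKeep (l : List (List Char)) : List String :=
  (l.filter (fun t => PySem.Chars.endswith t ['-', '1'])).map
    (fun t => String.ofList (PySem.Chars.slice t none (some (-2))))

-- A whitespace-only string splits into no tokens.
lemma pv_go_all_space (cs : List Char) (acc : List (List Char))
    (h : ∀ c ∈ cs, PySem.Chars.isspace c = true) :
    PySem.Chars.split₀.go cs [] acc = acc.reverse := by
  induction cs generalizing acc with
  | nil => simp [PySem.Chars.split₀.go]
  | cons c rest ih =>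
      have hc := h c (by simp)
      simp only [PySem.Chars.split₀.go, hc, if_true, List.isEmpty_nil]
      exact ih acc (fun x hx => h x (by simp [hx]))

lemma pv_strip_nil_all_space (cs : List Char) (h : PySem.Chars.strip cs = []) :
    ∀ c ∈ cs, PySem.Chars.isspace c = true := by
  intro c hc
  have h2 : ∀ x ∈ PySem.Chars.lstrip cs, PySem.Chars.isspace x = true := by
    intro x hx
    have hdw : List.dropWhile PySem.Chars.isspace (PySem.Chars.lstrip cs).reverse = [] := by
      have := congrArg List.reverse h
      simpa [PySem.Chars.strip, PySem.Chars.rstrip] using this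
    rw [List.dropWhile_eq_nil_iff] at hdw
    exact hdw x (by simpa using hx)
  have hsplit : cs = List.takeWhile PySem.Chars.isspace cs ++ List.dropWhile PySem.Chars.isspace cs :=
    (List.takeWhile_append_dropWhile).symm
  rw [hsplit] at hc
  rcases List.mem_append.mp hc with h1 | h1
  · exact List.mem_takeWhile_imp h1
  · exact h2 c (by simpa [PySem.Chars.lstrip] using h1)

lemma pv_split₀_nil (s : String) (h : PySem.Str.strip s = "") :
    PySem.Str.split₀ s = [] := by
  have hc : PySem.Chars.strip s.toList = [] := by
    have := congrArg String.toList h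
    simpa [PySem.Str.toList_strip] using this
  have hch : PySem.Chars.split₀ s.toList = [] := by
    simpa [PySem.Chars.split₀] using
      pv_go_all_space s.toList [] (pv_strip_nil_all_space s.toList hc)
  have hm : List.map String.toList (PySem.Str.split₀ s) = [] := by
    rw [PySem.Str.split₀_map_toList, hch]
  exact List.map_eq_nil_iff.mp hm

-- Per-token: A's body appends exactly the tokens pvKeep keeps, with the same id.
lemma pv_step (acc : List String) (t : String) :
    (if PySem.Str.isIn "-" t then
        let rev := t.toList.reverse
        let label := (rev.takeWhile (fun c => c ≠ '-')).reverse
        let nid := String.ofList ((rev.dropWhile (fun c => c ≠ '-')).tail.reverse)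
        if label = ['1'] then acc ++ [nid] else acc
      else acc)
    = if PySem.Str.endswith t "-1" then acc ++ [PySem.Str.slice t none (some (-2))] else acc := by
  by_cases h : PySem.Str.endswith t "-1" = true
  · have hb : PySem.Chars.endswith t.toList ['-', '1'] = true := by
      have e : ("-1" : String).toList = ['-', '1'] := by decide
      rw [PySem.Str.endswith_eq, e] at h
      exact h
    obtain ⟨xs, hxs⟩ := (PySem.Chars.endswith_iff _ _).mp hb
    have hts : t.toList = xs ++ ['-', '1'] := hxs.symm
    have hin : PySem.Str.isIn "-" t = true := by
      rw [PySem.Str.isIn_iff_infix]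
      have e2 : ("-" : String).toList = ['-'] := by decide
      rw [e2, hts]
      exact ⟨xs, ['1'], by simp⟩
    have hslice : PySem.Str.slice t none (some (-2)) = String.ofList xs := by
      have hsl : (PySem.Str.slice t none (some (-2))).toList = xs := by
        rw [PySem.Str.toList_slice, PySem.Chars.slice_eq_listSlice,
          PySem.List.slice_to_neg_ofNat t.toList 2 (by omega), hts]
        simp
      rw [← hsl, String.ofList_toList]
    simp only [h, hin, if_true, hts]
    have hrev : (xs ++ ['-', '1']).reverse = '1' :: '-' :: xs.reverse := by simp
    rw [hrev]
    simp [hslice]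
  · have hb : ¬ PySem.Chars.endswith t.toList ['-', '1'] = true := by
      have e : ("-1" : String).toList = ['-', '1'] := by decide
      rw [PySem.Str.endswith_eq, e] at h
      exact h
    rw [if_neg h]
    by_cases hin : PySem.Str.isIn "-" t = true
    · rw [if_pos hin]
      show (if ((t.toList.reverse.takeWhile (fun c => c ≠ '-')).reverse = ['1'])
            then acc ++ [String.ofList ((t.toList.reverse.dropWhile (fun c => c ≠ '-')).tail.reverse)]
            else acc) = acc
      have hlab : ¬ ((t.toList.reverse.takeWhile (fun c => c ≠ '-')).reverse = ['1']) := by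
        intro hl
        have htw : t.toList.reverse.takeWhile (fun c => c ≠ '-') = ['1'] := by
          have := congrArg List.reverse hl
          simpa using this
        cases hrv : t.toList.reverse with
        | nil => rw [hrv] at htw; simp at htw
        | cons a r =>
            rw [hrv, List.takeWhile_cons] at htw
            by_cases ha : a = '-'
            · simp [ha] at htw
            · rw [if_pos (show (decide (a ≠ '-')) = true by simp [ha])] at htw
              simp only [List.cons.injEq] at htw
              obtain ⟨ha1, htr⟩ := htw
              cases hr : r with
              | nil =>
                  have htl : t.toList = ['1'] := by
                    have := congrArg List.reverse hrv
                    simpa [hr, ha1] using this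
                  rw [PySem.Str.isIn_iff_infix] at hin
                  have e2 : ("-" : String).toList = ['-'] := by decide
                  rw [e2, htl] at hin
                  have hmem : ('-' : Char) ∈ (['1'] : List Char) := hin.subset (by simp)
                  simp at hmem
              | cons b r' =>
                  rw [hr, List.takeWhile_cons] at htr
                  by_cases hbx : b = '-'
                  · apply hb
                    apply (PySem.Chars.endswith_iff _ _).mpr
                    have htl : t.toList = r'.reverse ++ ['-', '1'] := by
                      have := congrArg List.reverse hrv
                      simpa [hr, ha1, hbx] using this
                    exact ⟨r'.reverse, htl.symm⟩
                  · rw [if_pos (show (decide (b ≠ '-')) = true by simp [hbx])] at htr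
                    simp at htr
      rw [if_neg hlab]
    · rw [if_neg hin]

-- pvKeep over a list of Strings (token level), bridged to char level.
lemma pv_keep_map (l : List String) :
    pvKeep (l.map String.toList)
      = (l.filter (fun t => PySem.Str.endswith t "-1")).map
          (fun t => PySem.Str.slice t none (some (-2))) := by
  induction l with
  | nil => simp [pvKeep]
  | cons t rest ih =>
      have e : ("-1" : String).toList = ['-', '1'] := by decide
      simp only [List.map_cons, pvKeep, List.filter_cons] at ih ⊢
      by_cases h : PySem.Str.endswith t "-1" = true
      · have hb : PySem.Chars.endswith t.toList ['-', '1'] = true := by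
          rw [PySem.Str.endswith_eq, e] at h; exact h
        have hsl : PySem.Str.slice t none (some (-2))
            = String.ofList (PySem.Chars.slice t.toList none (some (-2))) := by
          rw [← PySem.Str.toList_slice, String.ofList_toList]
        rw [if_pos h, if_pos hb, List.map_cons, List.map_cons, ih, hsl]
      · have hb : ¬ PySem.Chars.endswith t.toList ['-', '1'] = true := by
          rw [PySem.Str.endswith_eq, e] at h; exact h
        rw [if_neg h, if_neg hb, ih]

-- The whole A loop: fold of A's body = pvKeep of the split tokens.
lemma pv_fold (l : List String) (acc : List String) :
    l.foldl
      (fun clicked imp =>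
        if PySem.Str.isIn "-" imp then
          let rev := imp.toList.reverse
          let label := (rev.takeWhile (fun c => c ≠ '-')).reverse
          let nid := String.ofList ((rev.dropWhile (fun c => c ≠ '-')).tail.reverse)
          if label = ['1'] then clicked ++ [nid] else clicked
        else clicked)
      acc
    = acc ++ (l.filter (fun t => PySem.Str.endswith t "-1")).map
        (fun t => PySem.Str.slice t none (some (-2))) := by
  induction l generalizing acc with
  | nil => simp
  | cons t rest ih =>
      rw [List.foldl_cons, ih, pv_step acc t, List.filter_cons]
      by_cases ht : PySem.Str.endswith t "-1" = true
      · rw [if_pos ht, if_pos ht, List.map_cons]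
        simp
      · rw [if_neg ht, if_neg ht]

-- split₀.go's token accumulator commutes out.
lemma pv_go_acc (cs : List Char) (cur : List Char) (accT : List (List Char)) :
    PySem.Chars.split₀.go cs cur accT
      = accT.reverse ++ PySem.Chars.split₀.go cs cur [] := by
  induction cs generalizing cur accT with
  | nil =>
      by_cases hc : cur.isEmpty = true <;>
        simp [PySem.Chars.split₀.go, hc]
  | cons c rest ih =>
      by_cases hs : PySem.Chars.isspace c = true
      · by_cases hc : cur.isEmpty = true
        · simp only [PySem.Chars.split₀.go, hs, hc, if_true]
          exact ih [] accT
        · simp only [PySem.Chars.split₀.go, hs, hc, if_true]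
          rw [ih [] (cur.reverse :: accT), ih [] [cur.reverse]]
          simp
      · simp only [PySem.Chars.split₀.go, hs]
        exact ih (c :: cur) accT

-- The B scan equals pvKeep over the tokens split₀ would produce.
lemma pv_scan_eq (cs : List Char) (tok : List Char) (acc : List String) :
    pvScanB cs tok acc = acc ++ pvKeep (PySem.Chars.split₀.go cs tok.reverse []) := by
  induction cs generalizing tok acc with
  | nil =>
      by_cases hc : tok = []
      · subst hc
        simp [pvScanB, PySem.Chars.split₀.go, pvKeep, PySem.Chars.endswith]
      · have hne : (tok.reverse.isEmpty = true) = False := by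
          simp [List.isEmpty_iff, hc]
        simp only [pvScanB, PySem.Chars.split₀.go, hne, if_false, List.reverse_reverse]
        by_cases h : PySem.Chars.endswith tok ['-', '1'] = true <;>
          simp [pvKeep, h]
  | cons c rest ih =>
      by_cases hs : PySem.Chars.isspace c = true
      · by_cases hc : tok = []
        · subst hc
          have he : (PySem.Chars.endswith ([] : List Char) ['-', '1'] = true) = False := by
            simp [PySem.Chars.endswith]
          simp only [pvScanB, PySem.Chars.split₀.go, hs, if_true, List.reverse_nil,
            List.isEmpty_nil, he, if_false]
          exact ih [] acc
        · have hne : (tok.reverse.isEmpty = true) = False := by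
            simp [List.isEmpty_iff, hc]
          simp only [pvScanB, PySem.Chars.split₀.go, hs, if_true, hne, if_false,
            List.reverse_reverse]
          rw [ih [] _, pv_go_acc rest [] [tok]]
          by_cases h : PySem.Chars.endswith tok ['-', '1'] = true <;>
            simp [pvKeep, h]
      · simp only [pvScanB, PySem.Chars.split₀.go, hs]
        rw [ih (tok ++ [c]) acc]
        simp

-- ===== VERDICT (by name: the statement is the Claim_ definition above) =====
theorem parse_clicked_from_impressions_py_spec : Claim_equal_parse_clicked_from_impressions_py := by
  intro s _
  unfold Spec_parse_clicked_from_impressions_py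
  have hB : parse_clicked_from_impressions_py_alt s
      = (( PySem.Str.split₀ s).filter (fun t => PySem.Str.endswith t "-1")).map
          (fun t => PySem.Str.slice t none (some (-2))) := by
    unfold parse_clicked_from_impressions_py_alt
    rw [pv_scan_eq s.toList [] []]
    have hgo : PySem.Chars.split₀.go s.toList [] [] = PySem.Chars.split₀ s.toList := rfl
    rw [show ([] : List Char).reverse = [] from rfl, hgo, ← PySem.Str.split₀_map_toList,
      pv_keep_map]
    simp
  unfold parse_clicked_from_impressions_py
  by_cases hg : (PySem.Str.strip s == "") = true
  · have hnil := pv_split₀_nil s (by simpa using hg)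
    simp [hg, hB, hnil]
  · simp only [hg]
    rw [hB]
    exact pv_fold _ []
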